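-- pv_equiv track=rewrite | github.com/JangYuBBin/PROGRAMMERS | LV1/콜라 문제.py | solution
-- ===== SOURCE A (Python) =====
-- def solution(a, b, n):
--     answer = 0
--
--     while n >= a:
--         q, r = divmod(n, a)
--         answer += b * q
--         n -= a * q
--         n += b * q
--
--     return answer
-- ===== SOURCE B (Python) =====
-- def solution(a, b, n):
--     # Closed form: each trade of a empties nets a loss of (a - b) bottles,
--     # so the total number of bottles received is b * ((n - b) // (a - b));
--     # if we cannot afford even one trade, we receive nothing.
--     if n < a:
--         return 0
--     return b * ((n - b) // (a - b))
-- ===== Notes on version B (the rewrite author's own statement) =====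
-- stated objective: simpler
-- what changed: Replaces A's simulation loop of repeated divmod trades by the closed form b*((n-b)//(a-b)) (with 0 when n < a).
-- outside the precondition, e.g. on solution(3, -1, 10): A returns -3, B returns -2; on solution(-2, 5, 5): A returns -15, B returns 0
import Mathlib
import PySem

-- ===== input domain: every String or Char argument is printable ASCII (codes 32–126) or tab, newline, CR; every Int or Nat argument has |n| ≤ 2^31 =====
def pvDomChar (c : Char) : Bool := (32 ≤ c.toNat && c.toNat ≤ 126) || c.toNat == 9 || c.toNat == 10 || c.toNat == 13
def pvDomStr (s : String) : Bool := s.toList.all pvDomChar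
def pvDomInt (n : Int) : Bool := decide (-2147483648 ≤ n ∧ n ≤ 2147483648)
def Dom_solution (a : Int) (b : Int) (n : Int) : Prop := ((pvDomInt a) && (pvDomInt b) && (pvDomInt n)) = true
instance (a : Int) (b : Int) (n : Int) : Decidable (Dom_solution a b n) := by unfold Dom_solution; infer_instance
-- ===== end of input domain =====

-- Simpler: B replaces A's trade-simulation loop by the closed form b*((n-b)//(a-b)) (0 when n < a).


-- ===== PORT A =====
-- A's while-loop as fuel recursion; under Pre_ each iteration strictly decreases n,
-- so fuel n.toNat + 1 is never exhausted on admitted inputs.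
def solutionGo : Nat → Int → Int → Int → Int → Int
  | 0, _, _, _, answer => answer
  | f + 1, a, b, n, answer =>
    if a ≤ n then
      let q := PySem.Int.floordiv n a
      solutionGo f a b (n - a * q + b * q) (answer + b * q)
    else answer

def solution (a : Int) (b : Int) (n : Int) : Int :=
  solutionGo (n.toNat + 1) a b n 0

-- ===== PORT B =====
def solution_alt (a : Int) (b : Int) (n : Int) : Int :=
  if n < a then 0
  else b * PySem.Int.floordiv (n - b) (a - b)

-- ===== PRECONDITION & SPEC =====
-- Pre_ excludes inputs outside the stated problem domain 0 < b < a (unless the loop is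
-- never entered, n < a): there A diverges (b ≥ a with a ≤ n), raises ZeroDivisionError
-- (a = 0 ≤ n), or returns a junk-domain value the closed form does not match (b ≤ 0 or a < 0).
def Pre_solution (a : Int) (b : Int) (n : Int) : Prop := n < a ∨ (0 < b ∧ b < a)
instance (a : Int) (b : Int) (n : Int) : Decidable (Pre_solution a b n) := by unfold Pre_solution; infer_instance
def pvWitness_solution : Int × Int × Int := (3, 1, 20)
def Spec_solution (a : Int) (b : Int) (n : Int) (out : Int) : Prop := out = solution_alt a b n
instance (a : Int) (b : Int) (n : Int) (out : Int) : Decidable (Spec_solution a b n out) := by unfold Spec_solution; infer_instance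

-- ===== CLAIM (what is proved, stated in full; the proofs are below) =====
def Claim_equal_solution : Prop := ∀ (a : Int) (b : Int) (n : Int), Dom_solution a b n → Pre_solution a b n → Spec_solution a b n (solution a b n)

-- ===== LEMMAS AND PROOFS =====

-- Loop invariant: with 0 < b < a and enough fuel, the loop computes the closed form.
theorem solutionGo_closed (a b : Int) (hb : 0 < b) (hba : b < a) :
    ∀ (f : Nat) (n answer : Int), n.toNat < f →
      solutionGo f a b n answer =
        answer + (if n < a then 0 else b * PySem.Int.floordiv (n - b) (a - b)) := by
  intro f
  induction f with
  | zero => intro n answer h; omega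
  | succ f ih =>
    intro n answer hf
    by_cases hna : a ≤ n
    · have ha : 0 < a := lt_trans hb hba
      have hab : 0 < a - b := by omega
      -- rewrite floordivs as ediv (positive divisors)
      have hfa : PySem.Int.floordiv n a = n / a := PySem.Int.floordiv_eq_ediv_of_pos ha
      set q : Int := n / a with hq
      have hq1 : 1 ≤ q := by
        rw [hq, Int.le_ediv_iff_mul_le ha]; omega
      have hmod : n - a * q = n % a := by
        rw [hq]; have := Int.emod_def n a; omega
      have hmodlt : n % a < a := Int.emod_lt_of_pos n ha
      have hmodnn : 0 ≤ n % a := Int.emod_nonneg n (by omega)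
      set n' : Int := n - a * q + b * q with hn'
      have hbq : b * 1 ≤ b * q := by
        exact mul_le_mul_of_nonneg_left hq1 (le_of_lt hb)
      have hn'b : b ≤ n' := by rw [hn']; omega
      have habq : (a - b) * 1 ≤ (a - b) * q :=
        mul_le_mul_of_nonneg_left hq1 (le_of_lt hab)
      have hn'lt : n' < n := by
        have : n - n' = (a - b) * q := by rw [hn']; ring
        omega
      have hfuel : n'.toNat < f := by omega
      have step : solutionGo (f + 1) a b n answer =
          solutionGo f a b n' (answer + b * q) := by
        simp only [solutionGo, if_pos hna]
        rw [hfa]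
      rw [step, ih n' (answer + b * q) hfuel]
      -- shift identity: (n - b)/(a - b) = (n' - b)/(a - b) + q
      have hshift : (n - b) / (a - b) = (n' - b) / (a - b) + q := by
        have hdec : n - b = (n' - b) + q * (a - b) := by rw [hn']; ring
        rw [hdec, Int.add_mul_ediv_right _ _ (by omega : a - b ≠ 0)]
      have hfa2 : PySem.Int.floordiv (n - b) (a - b) = (n - b) / (a - b) :=
        PySem.Int.floordiv_eq_ediv_of_pos hab
      have hfa3 : PySem.Int.floordiv (n' - b) (a - b) = (n' - b) / (a - b) :=
        PySem.Int.floordiv_eq_ediv_of_pos hab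
      rw [if_neg (by omega : ¬ n < a), hfa2]
      by_cases hn'a : n' < a
      · have hz : (n' - b) / (a - b) = 0 :=
          Int.ediv_eq_zero_of_lt (by omega) (by omega)
        rw [if_pos hn'a, hshift, hz]; ring
      · rw [if_neg hn'a, hfa3, hshift]; ring
    · simp only [solutionGo, if_neg hna]
      rw [if_pos (by omega : n < a)]; ring

-- ===== VERDICT (by name: the statement is the Claim_ definition above) =====
theorem solution_spec : Claim_equal_solution := by
  intro a b n _ pre
  unfold Spec_solution solution solution_alt
  rcases pre with hna | ⟨hb, hba⟩
  · simp only [solutionGo, if_neg (by omega : ¬ a ≤ n), if_pos hna]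
  · rw [solutionGo_closed a b hb hba (n.toNat + 1) n 0 (by omega)]
    by_cases h : n < a
    · simp [h]
    · simp [h]
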